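-- pv_equiv track=rewrite | github.com/Chao-hu-Lab/XIC_Extractor | tools/diagnostics/untargeted_alignment_guardrails.py | _status_counts_by_family
-- ===== SOURCE A (Python) =====
-- from collections import Counter, defaultdict
--
-- def _status_counts_by_family(
--     cell_rows: list[dict[str, str]],
-- ) -> defaultdict[str, Counter[str]]:
--     counts: defaultdict[str, Counter[str]] = defaultdict(Counter)
--     for row in cell_rows:
--         family_id = row.get("feature_family_id", "")
--         if family_id:
--             counts[family_id][row.get("status", "")] += 1
--     return counts
-- ===== SOURCE B (Python) =====
-- from collections import Counter, defaultdict
--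
-- def _status_counts_by_family(
--     cell_rows: list[dict[str, str]],
-- ) -> defaultdict[str, Counter[str]]:
--     # Pass 1: project each row to a (family, status) pair.
--     pairs = [
--         (row.get("feature_family_id", ""), row.get("status", ""))
--         for row in cell_rows
--     ]
--     # Pass 2: bucket status values under their (non-empty) family.
--     index: defaultdict[str, list[str]] = defaultdict(list)
--     for family_id, status in pairs:
--         if family_id:
--             index[family_id].append(status)
--     # Pass 3: tally each bucket at once.
--     counts: defaultdict[str, Counter[str]] = defaultdict(Counter)
--     for family_id, statuses in index.items():
--         counts[family_id] = Counter(statuses)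
--     return counts
-- ===== Notes on version B (the rewrite author's own statement) =====
-- stated objective: alternative
-- what changed: Replaces the single inline nested-Counter-increment loop by three phases: project rows to (family, status) pairs with a comprehension, bucket statuses per non-empty family into lists, then build each family's Counter from its bucket at once.
import Mathlib
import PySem

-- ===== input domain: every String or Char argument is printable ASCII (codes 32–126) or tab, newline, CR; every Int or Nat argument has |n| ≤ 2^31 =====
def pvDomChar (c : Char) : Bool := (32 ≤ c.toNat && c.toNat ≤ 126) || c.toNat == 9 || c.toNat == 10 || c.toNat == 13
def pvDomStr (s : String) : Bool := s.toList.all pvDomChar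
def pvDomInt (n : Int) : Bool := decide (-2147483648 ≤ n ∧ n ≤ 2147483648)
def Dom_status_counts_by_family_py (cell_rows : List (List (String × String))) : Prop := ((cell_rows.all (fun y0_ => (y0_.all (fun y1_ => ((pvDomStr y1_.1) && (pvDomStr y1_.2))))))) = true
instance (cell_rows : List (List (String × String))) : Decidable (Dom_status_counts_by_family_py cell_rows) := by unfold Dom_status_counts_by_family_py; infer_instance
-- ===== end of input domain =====

-- B separates bucketing (family → list of statuses) from tallying (Counter per bucket);
-- same cost, different decomposition (objective: alternative).

-- ===== PORT A =====
def status_counts_by_family_py (cell_rows : List (List (String × String))) : List (String × List (String × Int)) :=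
  ((cell_rows.foldl (fun counts row =>
      let family_id := (PySem.Dict.mk row).getD "feature_family_id" ""
      if family_id ≠ "" then
        -- counts[family_id][row.get("status", "")] += 1  (defaultdict(Counter))
        counts.modify family_id PySem.Dict.empty
          (fun c => c.modify ((PySem.Dict.mk row).getD "status" "") 0 (· + 1))
      else counts) (PySem.Dict.empty)).items).map (fun p => (p.1, p.2.items))

-- ===== PORT B =====
def status_counts_by_family_py_alt (cell_rows : List (List (String × String))) : List (String × List (String × Int)) :=
  -- pairs = [(row.get("feature_family_id", ""), row.get("status", "")) for row in cell_rows]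
  -- then bucket under non-empty families, then Counter per bucket
  (((cell_rows.map (fun row =>
      ((PySem.Dict.mk row).getD "feature_family_id" "", (PySem.Dict.mk row).getD "status" ""))).foldl
    (fun index p =>
      if p.1 ≠ "" then index.modify p.1 [] (fun l => l ++ [p.2]) else index)
    (PySem.Dict.empty)).items).map (fun p => (p.1, (PySem.Dict.counter p.2).items))

-- ===== PRECONDITION & SPEC =====
def Spec_status_counts_by_family_py (cell_rows : List (List (String × String))) (out : List (String × List (String × Int))) : Prop := out = status_counts_by_family_py_alt cell_rows
instance (cell_rows : List (List (String × String))) (out : List (String × List (String × Int))) : Decidable (Spec_status_counts_by_family_py cell_rows out) := by unfold Spec_status_counts_by_family_py; infer_instance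

-- ===== CLAIM (what is proved, stated in full; the proofs are below) =====
def Claim_equal_status_counts_by_family_py : Prop := ∀ (cell_rows : List (List (String × String))), Dom_status_counts_by_family_py cell_rows → Spec_status_counts_by_family_py cell_rows (status_counts_by_family_py cell_rows)

-- ===== LEMMAS AND PROOFS =====

-- abbreviation for the value-wise Counter map relating B's index to A's counts
def pvG (p : String × List String) : String × PySem.Dict String Int := (p.1, PySem.Dict.counter p.2)

theorem pv_get?_map_counter (l : List (String × List String)) (k : String) :
    (PySem.Dict.mk (l.map pvG)).get? k = ((PySem.Dict.mk l).get? k).map PySem.Dict.counter := by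
  induction l with
  | nil => rfl
  | cons a rest ih =>
    obtain ⟨a1, a2⟩ := a
    simp only [List.map_cons, PySem.Dict.get?_mk_cons, pvG]
    by_cases h : (a1 == k) = true
    · rw [if_pos h, if_pos h]; rfl
    · rw [if_neg h, if_neg h]; exact ih

theorem pv_getD_rel (dA : PySem.Dict String (PySem.Dict String Int)) (dB : PySem.Dict String (List String))
    (h : dA.items = dB.items.map pvG) (k : String) :
    dA.getD k PySem.Dict.empty = PySem.Dict.counter (dB.getD k []) := by
  have hA : dA = PySem.Dict.mk (dB.items.map pvG) := PySem.Dict.ext h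
  have hget : dA.get? k = (dB.get? k).map PySem.Dict.counter := by
    rw [hA]; exact pv_get?_map_counter dB.items k
  rw [PySem.Dict.getD_eq_get?_getD, PySem.Dict.getD_eq_get?_getD, hget]
  cases dB.get? k with
  | none => rfl
  | some l => rfl

theorem pv_contains_rel (dA : PySem.Dict String (PySem.Dict String Int)) (dB : PySem.Dict String (List String))
    (h : dA.items = dB.items.map pvG) (k : String) : dA.contains k = dB.contains k := by
  have hA : dA = PySem.Dict.mk (dB.items.map pvG) := PySem.Dict.ext h
  rw [PySem.Dict.contains_eq_isSome_get?, PySem.Dict.contains_eq_isSome_get?, hA,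
    pv_get?_map_counter dB.items k]
  cases dB.get? k <;> rfl

theorem pv_step_rel (dA : PySem.Dict String (PySem.Dict String Int)) (dB : PySem.Dict String (List String))
    (h : dA.items = dB.items.map pvG) (k s : String) :
    (dA.modify k PySem.Dict.empty (fun c => c.modify s 0 (· + 1))).items
      = ((dB.modify k [] (fun l => l ++ [s])).items).map pvG := by
  have hmA : dA.modify k PySem.Dict.empty (fun c => c.modify s 0 (· + 1))
      = dA.insert k ((dA.getD k PySem.Dict.empty).modify s 0 (· + 1)) := rfl
  have hmB : dB.modify k [] (fun l => l ++ [s]) = dB.insert k (dB.getD k [] ++ [s]) := rfl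
  have hv : (dA.getD k PySem.Dict.empty).modify s 0 (· + 1)
      = PySem.Dict.counter (dB.getD k [] ++ [s]) := by
    rw [pv_getD_rel dA dB h k, PySem.Dict.counter_append_singleton]
  rw [hmA, hmB, PySem.Dict.items_insert, PySem.Dict.items_insert, pv_contains_rel dA dB h k]
  by_cases hc : dB.contains k = true
  · simp only [hc, if_true, h, List.map_map]
    apply List.map_congr_left
    intro p _
    by_cases hp : (p.1 == k) = true
    · simp [pvG, Function.comp, hp, hv]
    · simp [pvG, Function.comp, hp]
  · simp [hc, h, hv, pvG]

theorem pv_loop_rel (rows : List (List (String × String)))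
    (dA : PySem.Dict String (PySem.Dict String Int)) (dB : PySem.Dict String (List String))
    (h : dA.items = dB.items.map pvG) :
    (rows.foldl (fun counts row =>
      let family_id := (PySem.Dict.mk row).getD "feature_family_id" ""
      if family_id ≠ "" then
        counts.modify family_id PySem.Dict.empty
          (fun c => c.modify ((PySem.Dict.mk row).getD "status" "") 0 (· + 1))
      else counts) dA).items
    = (((rows.map (fun row =>
      ((PySem.Dict.mk row).getD "feature_family_id" "", (PySem.Dict.mk row).getD "status" ""))).foldl
      (fun index p =>
        if p.1 ≠ "" then index.modify p.1 [] (fun l => l ++ [p.2]) else index) dB).items).map pvG := by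
  induction rows generalizing dA dB with
  | nil => exact h
  | cons row rest ih =>
    simp only [List.map_cons, List.foldl_cons]
    by_cases hf : (PySem.Dict.mk row).getD "feature_family_id" "" ≠ ""
    · rw [if_pos hf, if_pos hf]
      exact ih _ _ (pv_step_rel dA dB h _ _)
    · rw [if_neg hf, if_neg hf]
      exact ih _ _ h

-- ===== VERDICT (by name: the statement is the Claim_ definition above) =====
theorem status_counts_by_family_py_spec : Claim_equal_status_counts_by_family_py := by
  intro cell_rows _
  unfold Spec_status_counts_by_family_py status_counts_by_family_py status_counts_by_family_py_alt
  rw [pv_loop_rel cell_rows PySem.Dict.empty PySem.Dict.empty rfl, List.map_map]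
  rfl
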